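-- pv_equiv track=rewrite | github.com/hellokayas/Some-Programming-Samples | sum of sums.py | sumallsubsqn
-- ===== SOURCE A (Python) =====
-- def subsequences(L,n):
--      return [L[i:i+n] for i in range(len(L)-n+1)]
--
-- def sumallsubsqn(L):
--      New = []
--      for n in range(1,len(L)+1):
--           N = (subsequences(L,n))
--           for i in N:
--                New.append(i)
--      C = []
--      for i in New:
--           C.append(sum(i))
--      return C
-- ===== SOURCE B (Python) =====
-- def sumallsubsqn(L):
--     # prefix sums: P[k] = sum of first k elements; each window sum is one subtraction
--     P = [0]
--     s = 0
--     for x in L: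
--         s += x
--         P.append(s)
--     out = []
--     for n in range(1, len(L) + 1):
--         for i in range(len(L) - n + 1):
--             out.append(P[i + n] - P[i])
--     return out
-- ===== Notes on version B (the rewrite author's own statement) =====
-- stated objective: faster
-- what changed: builds a prefix-sum table once and computes every contiguous-window sum as one subtraction, instead of materialising every slice and summing it
import Mathlib
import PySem

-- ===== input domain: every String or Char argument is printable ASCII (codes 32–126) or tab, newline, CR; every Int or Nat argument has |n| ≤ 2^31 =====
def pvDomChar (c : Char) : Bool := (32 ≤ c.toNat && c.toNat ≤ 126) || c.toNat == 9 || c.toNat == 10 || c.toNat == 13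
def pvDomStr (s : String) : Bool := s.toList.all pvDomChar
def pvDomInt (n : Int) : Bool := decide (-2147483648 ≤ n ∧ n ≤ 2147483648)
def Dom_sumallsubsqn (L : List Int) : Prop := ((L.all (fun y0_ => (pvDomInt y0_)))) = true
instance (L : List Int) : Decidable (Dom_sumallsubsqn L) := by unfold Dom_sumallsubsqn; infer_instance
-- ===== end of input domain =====

-- B replaces A's materialise-every-slice-and-sum (O(n^3)) by a prefix-sum table with one
-- subtraction per window (O(n^2)).

-- ===== PORT A =====
def subsequencesA (L : List Int) (n : Int) : List (List Int) :=
  (PySem.List.pyRange 0 ((PySem.List.len L) - n + 1) 1).map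
    (fun i => PySem.List.slice L (some i) (some (i + n)))

def sumallsubsqn (L : List Int) : List Int :=
  let New := (PySem.List.pyRange 1 ((PySem.List.len L) + 1) 1).foldl
    (fun acc n => (subsequencesA L n).foldl (fun acc2 i => acc2 ++ [i]) acc) []
  New.foldl (fun c i => c ++ [i.sum]) []

-- ===== PORT B =====
def sumallsubsqn_alt (L : List Int) : List Int :=
  -- P = [0]; s = 0; for x in L: s += x; P.append(s)
  let P : List Int :=
    (L.foldl (fun (q : List Int × Int) x => (q.1 ++ [q.2 + x], q.2 + x)) ([0], 0)).1
  (PySem.List.pyRange 1 ((PySem.List.len L) + 1) 1).foldl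
    (fun out n =>
      (PySem.List.pyRange 0 ((PySem.List.len L) - n + 1) 1).foldl
        (fun out2 i => out2 ++ [PySem.List.pyGetD P (i + n) 0 - PySem.List.pyGetD P i 0]) out)
    []

-- ===== PRECONDITION & SPEC =====
def Spec_sumallsubsqn (L : List Int) (out : List Int) : Prop := out = sumallsubsqn_alt L
instance (L : List Int) (out : List Int) : Decidable (Spec_sumallsubsqn L out) := by unfold Spec_sumallsubsqn; infer_instance

-- ===== CLAIM (what is proved, stated in full; the proofs are below) =====
def Claim_equal_sumallsubsqn : Prop := ∀ (L : List Int), Dom_sumallsubsqn L → Spec_sumallsubsqn L (sumallsubsqn L)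

-- ===== LEMMAS AND PROOFS =====

theorem pv_flatMap_congr {α β : Type} {l : List α} {f g : α → List β}
    (h : ∀ a ∈ l, f a = g a) : l.flatMap f = l.flatMap g := by
  induction l with
  | nil => rfl
  | cons x t ih =>
      simp only [List.flatMap_cons]
      rw [h x (List.mem_cons_self), ih (fun a ha => h a (List.mem_cons_of_mem _ ha))]

-- the prefix-sum loop of B, characterised
theorem pv_prefix_foldl (L : List Int) (p : List Int) (s : Int) :
    (L.foldl (fun (q : List Int × Int) x => (q.1 ++ [q.2 + x], q.2 + x)) (p, s)).1
      = p ++ (List.range L.length).map (fun k => s + (L.take (k + 1)).sum) := by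
  induction L generalizing p s with
  | nil => simp
  | cons x t ih =>
      simp only [List.foldl_cons, List.length_cons]
      rw [ih]
      rw [List.range_succ_eq_map]
      simp [List.map_map, Function.comp, add_assoc, List.append_assoc]

theorem pv_P_eq (L : List Int) :
    (L.foldl (fun (q : List Int × Int) x => (q.1 ++ [q.2 + x], q.2 + x)) ([0], 0)).1
      = (List.range (L.length + 1)).map (fun k => (L.take k).sum) := by
  rw [pv_prefix_foldl, List.range_succ_eq_map]
  simp [List.map_map, Function.comp]

theorem pv_getD_P (L : List Int) (j : Int) (h0 : 0 ≤ j) (h1 : j ≤ (L.length : Int)) :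
    PySem.List.pyGetD
      ((List.range (L.length + 1)).map (fun k => (L.take k).sum)) j 0
      = (L.take j.toNat).sum := by
  rw [PySem.List.pyGetD_eq_getElem]
  · rw [List.getElem_map, List.getElem_range]
  · exact h0
  · simp; omega

-- sum of a window from prefix sums
theorem pv_window (L : List Int) (a n : Nat) :
    ((L.drop a).take n).sum = (L.take (a + n)).sum - (L.take a).sum := by
  rw [List.take_add, List.sum_append]; ring

theorem sumallsubsqn_eq (L : List Int) : sumallsubsqn L = sumallsubsqn_alt L := by
  unfold sumallsubsqn sumallsubsqn_alt subsequencesA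
  rw [pv_P_eq]
  simp only [PySem.List.foldl_append_singleton_eq_self,
    PySem.List.foldl_append_eq_flatMap, List.nil_append]
  rw [List.flatMap_assoc]
  refine pv_flatMap_congr ?_
  intro n hn
  rw [PySem.List.mem_pyRange_one] at hn
  simp only [PySem.List.len_eq] at hn ⊢
  rw [List.flatMap_map]
  refine pv_flatMap_congr ?_
  intro i hi
  rw [PySem.List.mem_pyRange_one] at hi
  obtain ⟨hi0, hi1⟩ := hi
  obtain ⟨hn1, hn2⟩ := hn
  rw [PySem.List.slice_toNat L hi0 (by omega)]
  have hin : (i + n).toNat = i.toNat + n.toNat := by omega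
  rw [hin, Nat.add_sub_cancel_left, pv_window]
  rw [pv_getD_P L (i+n) (by omega) (by omega), pv_getD_P L i hi0 (by omega), hin]

-- ===== VERDICT (by name: the statement is the Claim_ definition above) =====
theorem sumallsubsqn_spec : Claim_equal_sumallsubsqn := by
  intro L _
  unfold Spec_sumallsubsqn
  exact sumallsubsqn_eq L
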